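-- pv_equiv track=rewrite | github.com/leslierere/leetcode_with_python | not_in_lc/amazon/ItemsInContainer.py | noItems
-- ===== SOURCE A (Python) =====
-- def noItems(s:str, startIndices, endIndices):
--     # from start(included) to end(included), how many items we have
--     dp = [[0 for i in range(len(s))] for j in range(len(s))]
--
--     first_idx = s.find("|")
--     if first_idx == -1:
--         return [0 for i in range(len(startIndices))]
--     second_idx = s.find("|", first_idx+1)
--     if second_idx == -1:
--         return [0 for i in range(len(startIndices))]
--
--     dp[first_idx][second_idx] = second_idx - first_idx - 1
--
--     left_bar = [-1 for i in range(len(s))]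
--     # store the bar closest to the current index on the left side
--     last_bar = -1
--     for i in range(len(s)):
--         left_bar[i] = last_bar
--         if s[i] == "|":
--             last_bar = i
--
--     for start in range(len(s)-2):
--         for end in range(start+1, len(s)):
--             if s[end] == "|":
--                 pre_bar = left_bar[end]
--                 # for j in range(end-1, start-1, -1): # store before
--                 #     if s[j] == "|":
--                 #         dp[start][end] = dp[start][j] + end - j -1
--                 #         break
--                 if pre_bar != -1 and pre_bar >= start:
--                     dp[start][end] = dp[start][pre_bar] + end - pre_bar -1
--             else:
--                 dp[start][end] = dp[start][end-1]
--
--     res = []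
--     for i in range(len(startIndices)):
--         start = startIndices[i] - 1
--         end = endIndices[i] - 1
--         res.append(dp[start][end])
--
--     return res
-- ===== SOURCE B (Python) =====
-- def noItems(s, startIndices, endIndices):
--     # Prefix item counts + nearest-bar arrays: O(n + q) instead of the O(n^2) DP table.
--     n = len(s)
--     if sum(c == '|' for c in s) < 2:
--         return [0] * len(startIndices)
--     pref = [0]   # pref[j]: number of items (non-bar chars) in s[:j]
--     prv = [-1]   # prv[j]: rightmost bar index below j, or -1
--     p, q = 0, -1
--     for i in range(n):
--         if s[i] == '|':
--             q = i
--         else: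
--             p += 1
--         pref.append(p)
--         prv.append(q)
--     nxt = [n]    # after reversing: nxt[i]: leftmost bar index >= i, or n
--     r = n
--     for i in reversed(range(n)):
--         if s[i] == '|':
--             r = i
--         nxt.append(r)
--     nxt.reverse()
--     res = []
--     for i in range(len(startIndices)):
--         l = nxt[startIndices[i] - 1]
--         rb = prv[endIndices[i]]
--         res.append(pref[rb] - pref[l + 1] if l < rb else 0)
--     return res
-- ===== Notes on version B (the rewrite author's own statement) =====
-- stated objective: faster
-- what changed: Replaced A's O(n^2) DP table (dp[start][end] for every pair) with one forward scan building prefix item counts and nearest-bar-on-the-left, one backward scan for nearest-bar-on-the-right, and an O(1) prefix-difference lookup per query.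
-- outside the precondition, e.g. on noItems('|ab|', [1], [0]): A returns [2], B returns [0]; on noItems('|a|ab|', [0], [6]): A returns [0], B returns [0]
import Mathlib
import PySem

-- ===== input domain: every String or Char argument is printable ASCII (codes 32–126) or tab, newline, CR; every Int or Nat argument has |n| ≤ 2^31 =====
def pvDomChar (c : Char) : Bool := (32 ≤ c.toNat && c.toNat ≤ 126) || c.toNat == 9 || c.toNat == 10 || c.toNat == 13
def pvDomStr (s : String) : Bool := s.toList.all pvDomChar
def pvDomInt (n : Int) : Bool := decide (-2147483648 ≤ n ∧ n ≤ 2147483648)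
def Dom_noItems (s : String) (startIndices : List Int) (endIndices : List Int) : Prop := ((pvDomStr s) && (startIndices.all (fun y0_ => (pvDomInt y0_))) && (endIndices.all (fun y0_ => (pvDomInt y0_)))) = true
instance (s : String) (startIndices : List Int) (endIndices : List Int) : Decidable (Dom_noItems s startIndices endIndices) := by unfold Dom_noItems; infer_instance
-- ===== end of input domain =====

-- B replaces A's O(n^2) DP table with prefix item counts and nearest-bar arrays (one forward
-- and one backward scan), answering each query in O(1).

-- ===== PORT A =====
-- [0 for i in range(L)]
def aZeros (L : Nat) : List Int := (List.range L).map (fun _ => (0 : Int))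

-- left_bar loop: for i in range(len(s)): left_bar[i] = last_bar; if s[i] == "|": last_bar = i
-- (preallocate-and-assign-in-order ported as append-in-order)
def aLeftBar (cs : List Char) : List Int :=
  ((List.range cs.length).foldl
    (fun (t : List Int × Int) i =>
      (t.1 ++ [t.2], if cs.getD i ' ' = '|' then (i : Int) else t.2))
    ([], -1)).1

-- inner loop: for end in range(start+1, len(s)): ...
def aInner (cs : List Char) (left_bar : List Int) (start : Nat) (dp0 : List (List Int)) : List (List Int) :=
  (List.range' (start + 1) (cs.length - (start + 1))).foldl
    (fun dp e =>
      let row := dp.getD start []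
      if cs.getD e ' ' = '|' then
        let pre_bar := left_bar.getD e 0
        if pre_bar ≠ -1 ∧ (start : Int) ≤ pre_bar then
          dp.set start (row.set e (row.getD pre_bar.toNat 0 + (e : Int) - pre_bar - 1))
        else dp
      else dp.set start (row.set e (row.getD (e - 1) 0)))
    dp0

-- outer loop: for start in range(len(s)-2): ...
def aFill (cs : List Char) (left_bar : List Int) (dp0 : List (List Int)) : List (List Int) :=
  (List.range (cs.length - 2)).foldl (fun dp start => aInner cs left_bar start dp) dp0

-- result loop: res.append(dp[startIndices[i]-1][endIndices[i]-1])
def aRes (dp : List (List Int)) (startIndices endIndices : List Int) : List Int :=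
  (List.range startIndices.length).foldl
    (fun res (i : Nat) =>
      let st := PySem.List.pyGetD startIndices (i : Int) 0 - 1
      let en := PySem.List.pyGetD endIndices (i : Int) 0 - 1
      res ++ [PySem.List.pyGetD (PySem.List.pyGetD dp st []) en 0])
    []

def noItems (s : String) (startIndices : List Int) (endIndices : List Int) : List Int :=
  let cs := s.toList
  let n := cs.length
  let dp0 : List (List Int) := List.replicate n (List.replicate n (0 : Int))
  let first := PySem.Str.find s "|"
  if first = -1 then aZeros startIndices.length
  else
    let second := PySem.Str.findFrom s "|" (first + 1)
    if second = -1 then aZeros startIndices.length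
    else
      -- dp[first_idx][second_idx] = second_idx - first_idx - 1
      let dp1 := dp0.set first.toNat ((dp0.getD first.toNat []).set second.toNat (second - first - 1))
      let dp := aFill cs (aLeftBar cs) dp1
      aRes dp startIndices endIndices

-- ===== PORT B =====
-- forward scan building pref (prefix item counts) and prv (nearest bar on the left)
def bScan (cs : List Char) : List Int × List Int × Int × Int :=
  (List.range cs.length).foldl
    (fun (t : List Int × List Int × Int × Int) i =>
      let q := if cs.getD i ' ' = '|' then (i : Int) else t.2.2.2
      let p := if cs.getD i ' ' = '|' then t.2.2.1 else t.2.2.1 + 1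
      (t.1 ++ [p], t.2.1 ++ [q], p, q))
    ([0], [-1], 0, -1)

-- backward scan building nxt (nearest bar on the right), then reversed
def bNxt (cs : List Char) : List Int :=
  (((List.range cs.length).reverse).foldl
    (fun (t : List Int × Int) i =>
      let r := if cs.getD i ' ' = '|' then (i : Int) else t.2
      (t.1 ++ [r], r))
    ([(cs.length : Int)], (cs.length : Int))).1.reverse

-- query loop: O(1) per query from the three arrays
def bRes (pref prv nxt : List Int) (startIndices endIndices : List Int) : List Int :=
  (List.range startIndices.length).foldl
    (fun res (i : Nat) =>
      let l := PySem.List.pyGetD nxt (PySem.List.pyGetD startIndices (i : Int) 0 - 1) 0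
      let rb := PySem.List.pyGetD prv (PySem.List.pyGetD endIndices (i : Int) 0) 0
      res ++ [if l < rb then PySem.List.pyGetD pref rb 0 - PySem.List.pyGetD pref (l + 1) 0 else 0])
    []

def noItems_alt (s : String) (startIndices : List Int) (endIndices : List Int) : List Int :=
  let cs := s.toList
  if (cs.map (fun c => if c = '|' then (1 : Int) else 0)).sum < 2 then
    List.replicate startIndices.length (0 : Int)
  else
    let t := bScan cs
    bRes t.1 t.2.1 (bNxt cs) startIndices endIndices

-- ===== PRECONDITION & SPEC =====
-- Pre_ excludes (only when s contains at least two bars) inputs whose 1-indexed query positions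
-- fall outside 1..len(s) or whose endIndices list is shorter than startIndices: on those A either
-- raises IndexError or returns values produced by Python's negative-index wraparound, which are
-- accidental corner behaviour.
def Pre_noItems (s : String) (startIndices : List Int) (endIndices : List Int) : Prop :=
  (s.toList.countP (fun c => c = '|') < 2) ∨
  (startIndices.length ≤ endIndices.length ∧
    ∀ q ∈ startIndices ++ endIndices.take startIndices.length,
      1 ≤ q ∧ q ≤ (s.toList.length : Int))

instance (s : String) (startIndices : List Int) (endIndices : List Int) : Decidable (Pre_noItems s startIndices endIndices) := by unfold Pre_noItems; infer_instance

def pvWitness_noItems : String × List Int × List Int := ("|ab|c|", [1, 2, 4], [6, 4, 6])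

def Spec_noItems (s : String) (startIndices : List Int) (endIndices : List Int) (out : List Int) : Prop := out = noItems_alt s startIndices endIndices
instance (s : String) (startIndices : List Int) (endIndices : List Int) (out : List Int) : Decidable (Spec_noItems s startIndices endIndices out) := by unfold Spec_noItems; infer_instance

-- ===== CLAIM (what is proved, stated in full; the proofs are below) =====
def Claim_equal_noItems : Prop := ∀ (s : String) (startIndices : List Int) (endIndices : List Int), Dom_noItems s startIndices endIndices → Pre_noItems s startIndices endIndices → Spec_noItems s startIndices endIndices (noItems s startIndices endIndices)

-- ===== LEMMAS AND PROOFS =====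

-- nearest bar strictly below j (as Python index, -1 if none)
def prvF (cs : List Char) : Nat → Int
  | 0 => -1
  | j + 1 => if cs.getD j ' ' = '|' then (j : Int) else prvF cs j

-- nearest bar at or above i (cs.length if none)
def nxtF (cs : List Char) (i : Nat) : Nat :=
  if h : i < cs.length then (if cs[i] = '|' then i else nxtF cs (i + 1)) else cs.length
termination_by cs.length - i

-- number of non-bar chars among the first j
def cntF (cs : List Char) (j : Nat) : Int := ((cs.take j).countP (fun c => !(c == '|')) : Int)

-- the value of a query [a, b] (0-based, inclusive)
def V (cs : List Char) (a b : Nat) : Int :=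
  if (nxtF cs a : Int) < prvF cs (b + 1) then
    cntF cs (prvF cs (b + 1)).toNat - cntF cs (nxtF cs a + 1)
  else 0

-- ---- generic getD/set helpers ----
theorem pvGetD_set_self {α : Type} (l : List α) (i : Nat) (v d : α) (h : i < l.length) :
    (l.set i v).getD i d = v := by
  simp [List.getD_eq_getElem?_getD, h]

theorem pvGetD_set_ne {α : Type} (l : List α) (i k : Nat) (v d : α) (h : i ≠ k) :
    (l.set i v).getD k d = l.getD k d := by
  simp [List.getD_eq_getElem?_getD, h]

theorem pvGetD_map_range (f : Nat → Int) (n i : Nat) (d : Int) (h : i < n) :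
    ((List.range n).map f).getD i d = f i := by
  simp [List.getD_eq_getElem?_getD, h]

-- ---- prvF ----
theorem prvF_succ (cs : List Char) (j : Nat) :
    prvF cs (j + 1) = if cs.getD j ' ' = '|' then (j : Int) else prvF cs j := rfl

theorem prvF_lt (cs : List Char) (j : Nat) : prvF cs j < (j : Int) := by
  induction j with
  | zero => simp [prvF]
  | succ j ih => simp only [prvF]; split <;> [omega; (push_cast; omega)]

theorem prvF_ge (cs : List Char) (j : Nat) : -1 ≤ prvF cs j := by
  induction j with
  | zero => simp [prvF]
  | succ j ih => simp only [prvF]; split <;> omega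

theorem prvF_bar (cs : List Char) (j : Nat) (h : 0 ≤ prvF cs j) :
    cs.getD (prvF cs j).toNat ' ' = '|' := by
  induction j with
  | zero => simp [prvF] at h
  | succ j ih =>
    by_cases hb : cs.getD j ' ' = '|'
    · rw [prvF_succ, if_pos hb]
      simpa using hb
    · rw [prvF_succ, if_neg hb] at h ⊢
      exact ih h

theorem prvF_max (cs : List Char) (j k : Nat) (hk : k < j) (hb : cs.getD k ' ' = '|') :
    (k : Int) ≤ prvF cs j := by
  induction j with
  | zero => omega
  | succ j ih =>
    by_cases he : k = j
    · subst he; rw [prvF_succ, if_pos hb]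
    · have := ih (by omega)
      rw [prvF_succ]; split <;> omega

-- ---- nxtF ----
theorem nxtF_step (cs : List Char) (i : Nat) (h : i < cs.length) :
    nxtF cs i = if cs.getD i ' ' = '|' then i else nxtF cs (i + 1) := by
  rw [nxtF, dif_pos h, List.getD_eq_getElem _ _ h]

theorem nxtF_stop (cs : List Char) (i : Nat) (h : ¬ i < cs.length) :
    nxtF cs i = cs.length := by
  rw [nxtF, dif_neg h]

theorem nxtF_ge (cs : List Char) (i : Nat) (hi : i ≤ cs.length) : i ≤ nxtF cs i := by
  have H : ∀ m i, cs.length - i = m → i ≤ cs.length → i ≤ nxtF cs i := by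
    intro m
    induction m with
    | zero => intro i hm hi; rw [nxtF]; split <;> omega
    | succ m ih =>
      intro i hm hi; rw [nxtF]
      split
      · split
        · exact le_refl _
        · have := ih (i + 1) (by omega) (by omega); omega
      · omega
  exact H _ i rfl hi

theorem nxtF_bar (cs : List Char) (i : Nat) (h : nxtF cs i < cs.length) :
    cs.getD (nxtF cs i) ' ' = '|' := by
  have H : ∀ m i, cs.length - i = m → nxtF cs i < cs.length → cs.getD (nxtF cs i) ' ' = '|' := by
    intro m
    induction m with
    | zero =>
      intro i hm hlt
      by_cases hin : i < cs.length
      · omega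
      · rw [nxtF_stop cs i hin] at hlt; omega
    | succ m ih =>
      intro i hm hlt
      by_cases hin : i < cs.length
      · by_cases hbar : cs.getD i ' ' = '|'
        · rw [nxtF_step cs i hin, if_pos hbar]; exact hbar
        · rw [nxtF_step cs i hin, if_neg hbar] at hlt ⊢
          exact ih (i + 1) (by omega) hlt
      · rw [nxtF_stop cs i hin] at hlt; omega
  exact H _ i rfl h

theorem nxtF_min (cs : List Char) (i k : Nat) (hik : i ≤ k) (hk : k < nxtF cs i) :
    cs.getD k ' ' ≠ '|' := by
  have H : ∀ m i, cs.length - i = m → ∀ k, i ≤ k → k < nxtF cs i → cs.getD k ' ' ≠ '|' := by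
    intro m
    induction m with
    | zero =>
      intro i hm k hik hk
      by_cases hin : i < cs.length
      · omega
      · rw [nxtF_stop cs i hin] at hk; omega
    | succ m ih =>
      intro i hm k hik hk
      by_cases hin : i < cs.length
      · by_cases hbar : cs.getD i ' ' = '|'
        · rw [nxtF_step cs i hin, if_pos hbar] at hk; omega
        · rw [nxtF_step cs i hin, if_neg hbar] at hk
          rcases Nat.eq_or_lt_of_le hik with he | hlt
          · subst he; exact hbar
          · exact ih (i + 1) (by omega) k hlt hk
      · rw [nxtF_stop cs i hin] at hk; omega
  exact H _ i rfl k hik hk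

theorem nxtF_le_of_bar (cs : List Char) (i k : Nat) (hik : i ≤ k) (_hk : k < cs.length)
    (hb : cs.getD k ' ' = '|') : nxtF cs i ≤ k := by
  by_contra hc
  exact nxtF_min cs i k hik (by omega) hb

-- ---- cntF ----
theorem cntF_succ (cs : List Char) (j : Nat) (h : j < cs.length) :
    cntF cs (j + 1) = cntF cs j + (if cs.getD j ' ' = '|' then 0 else 1) := by
  unfold cntF
  rw [List.take_add_one, List.getElem?_eq_getElem h]
  rw [List.getD_eq_getElem _ _ h]
  simp only [Option.toList_some, List.countP_append, List.countP_cons, List.countP_nil]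
  by_cases hb : cs[j] = '|'
  · simp [hb]
  · simp [hb]

theorem cntF_diff_nobar (cs : List Char) (p k : Nat) (hpk : p ≤ k) :
    k ≤ cs.length → (∀ i, p ≤ i → i < k → cs.getD i ' ' ≠ '|') →
    cntF cs k - cntF cs p = (k : Int) - p := by
  induction k, hpk using Nat.le_induction with
  | base => intro _ _; simp
  | succ k hpk ih =>
    intro hk hno
    rw [cntF_succ cs k (by omega), if_neg (hno k (by omega) (by omega))]
    have := ih (by omega) (fun i h1 h2 => hno i h1 (by omega))
    push_cast at this ⊢
    omega

theorem cntF_succ_bar (cs : List Char) (j : Nat) (h : j < cs.length)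
    (hb : cs.getD j ' ' = '|') : cntF cs (j + 1) = cntF cs j := by
  rw [cntF_succ cs j h, if_pos hb]; ring

-- ---- V ----
theorem V_zero_of_le (cs : List Char) (a b : Nat) (hba : b ≤ a) (ha : a ≤ cs.length) :
    V cs a b = 0 := by
  unfold V
  rw [if_neg]
  have h1 := prvF_lt cs (b + 1)
  have h2 := nxtF_ge cs a ha
  push_cast at *
  omega

theorem V_big (cs : List Char) (a b : Nat) (h : cs.length ≤ a + 2) (hb : b < cs.length)
    (ha : a ≤ cs.length) : V cs a b = 0 := by
  unfold V
  split
  · rename_i hc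
    have h1 := prvF_lt cs (b + 1)
    have h2 := nxtF_ge cs a ha
    have hpn : (prvF cs (b + 1)).toNat = nxtF cs a + 1 := by omega
    rw [hpn]
    ring
  · rfl

theorem V_step_nonbar (cs : List Char) (a b : Nat) (h : cs.getD (b + 1) ' ' ≠ '|') :
    V cs a (b + 1) = V cs a b := by
  unfold V
  have hp : prvF cs (b + 1 + 1) = prvF cs (b + 1) := by rw [prvF_succ, if_neg h]
  rw [hp]

theorem V_step_bar (cs : List Char) (a e : Nat) (hb : cs.getD e ' ' = '|') (he : e < cs.length)
    (hap : (a : Int) ≤ prvF cs e) (ha : a ≤ cs.length) :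
    V cs a e = V cs a (prvF cs e).toNat + (e : Int) - prvF cs e - 1 := by
  have hp0 : 0 ≤ prvF cs e := le_trans (by positivity) hap
  set p : Nat := (prvF cs e).toNat with hpdef
  have hpe : (prvF cs e) = (p : Int) := by omega
  have hpbar : cs.getD p ' ' = '|' := prvF_bar cs e hp0
  have hple : p < e := by have := prvF_lt cs e; omega
  have hnle : nxtF cs a ≤ p := nxtF_le_of_bar cs a p (by omega) (by omega) hpbar
  have hnge : a ≤ nxtF cs a := nxtF_ge cs a ha
  have hnob : ∀ i, p + 1 ≤ i → i < e → cs.getD i ' ' ≠ '|' := by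
    intro i h1 h2 hbar
    have := prvF_max cs e i h2 hbar
    omega
  have hdiff : cntF cs e - cntF cs (p + 1) = (e : Int) - (p + 1) :=
    cntF_diff_nobar cs (p + 1) e (by omega) (by omega) hnob
  have hstep : cntF cs (p + 1) = cntF cs p := cntF_succ_bar cs p (by omega) hpbar
  have hre : prvF cs (e + 1) = (e : Int) := by rw [prvF_succ, if_pos hb]
  have hrp : prvF cs (p + 1) = (p : Int) := by rw [prvF_succ, if_pos hpbar]
  unfold V
  rw [hre, hrp, hpe]
  simp only [Int.toNat_natCast]
  rcases Nat.lt_or_ge (nxtF cs a) p with hlt | hge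
  · rw [if_pos (by exact_mod_cast by omega), if_pos (by exact_mod_cast by omega)]
    linarith [hdiff, hstep]
  · have heq : nxtF cs a = p := by omega
    rw [if_pos (by exact_mod_cast by omega), if_neg (by rw [heq]; omega)]
    rw [heq]
    linarith [hdiff]

theorem V_bar_out (cs : List Char) (a e : Nat) (hb : cs.getD e ' ' = '|') (he : e < cs.length)
    (h : prvF cs e < (a : Int)) (ha : a ≤ cs.length) : V cs a e = 0 := by
  unfold V
  rw [if_neg]
  intro hc
  have hre : prvF cs (e + 1) = (e : Int) := by rw [prvF_succ, if_pos hb]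
  rw [hre] at hc
  have h1 : nxtF cs a < e := by omega
  have h2 := nxtF_bar cs a (by omega)
  have h3 := prvF_max cs e (nxtF cs a) h1 h2
  have h4 := nxtF_ge cs a ha
  omega


-- ---- scan characterizations ----
theorem aLeftBar_fold (cs : List Char) (m : Nat) :
    (List.range m).foldl
      (fun (t : List Int × Int) i =>
        (t.1 ++ [t.2], if cs.getD i ' ' = '|' then (i : Int) else t.2)) ([], -1)
    = ((List.range m).map (prvF cs), prvF cs m) := by
  induction m with
  | zero => simp [prvF]
  | succ m ih =>
    rw [List.range_succ, List.foldl_append, ih]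
    simp only [List.foldl_cons, List.foldl_nil, List.map_append, List.map_cons, List.map_nil]
    rw [prvF_succ]

theorem aLeftBar_eq (cs : List Char) : aLeftBar cs = (List.range cs.length).map (prvF cs) := by
  unfold aLeftBar
  rw [aLeftBar_fold]

theorem bScan_fold (cs : List Char) (m : Nat) (hm : m ≤ cs.length) :
    (List.range m).foldl
      (fun (t : List Int × List Int × Int × Int) i =>
        let q := if cs.getD i ' ' = '|' then (i : Int) else t.2.2.2
        let p := if cs.getD i ' ' = '|' then t.2.2.1 else t.2.2.1 + 1
        (t.1 ++ [p], t.2.1 ++ [q], p, q)) ([0], [-1], 0, -1)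
    = ((List.range (m + 1)).map (cntF cs), (List.range (m + 1)).map (prvF cs), cntF cs m, prvF cs m) := by
  induction m with
  | zero => simp [cntF, prvF]
  | succ m ih =>
    rw [List.range_succ, List.foldl_append, ih (by omega)]
    simp only [List.foldl_cons, List.foldl_nil]
    have hc := cntF_succ cs m (by omega)
    have h2 : (if cs.getD m ' ' = '|' then cntF cs m else cntF cs m + 1) = cntF cs (m + 1) := by
      rw [hc]; split <;> ring
    rw [h2, ← prvF_succ]
    rw [List.range_succ (n := m + 1)]
    simp

theorem bScan_eq (cs : List Char) :
    bScan cs = ((List.range (cs.length + 1)).map (cntF cs),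
      (List.range (cs.length + 1)).map (prvF cs), cntF cs cs.length, prvF cs cs.length) := by
  unfold bScan
  exact bScan_fold cs cs.length (le_refl _)

theorem nxtF_len (cs : List Char) : nxtF cs cs.length = cs.length :=
  nxtF_stop cs cs.length (by omega)

theorem bNxt_fold (cs : List Char) (m j : Nat) (hjm : j + m = cs.length) :
    (List.range' j m).foldr
      (fun i (t : List Int × Int) =>
        ((t.1 ++ [if cs.getD i ' ' = '|' then (i : Int) else t.2]),
          if cs.getD i ' ' = '|' then (i : Int) else t.2))
      ([(cs.length : Int)], (cs.length : Int))
    = ((((List.range' j (m + 1)).map (fun i => (nxtF cs i : Int))).reverse), (nxtF cs j : Int)) := by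
  induction m generalizing j with
  | zero =>
    have : j = cs.length := by omega
    subst this
    simp [nxtF_len]
  | succ m ih =>
    rw [List.range'_succ, List.foldr_cons, ih (j + 1) (by omega)]
    have hstep : (if cs.getD j ' ' = '|' then (j : Int) else (nxtF cs (j + 1) : Int))
        = (nxtF cs j : Int) := by
      rw [nxtF_step cs j (by omega)]
      split <;> simp
    rw [hstep]
    simp [List.range'_succ]

theorem bNxt_eq (cs : List Char) :
    bNxt cs = (List.range (cs.length + 1)).map (fun i => (nxtF cs i : Int)) := by
  unfold bNxt
  rw [List.foldl_reverse, List.range_eq_range', bNxt_fold cs cs.length 0 (by omega)]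
  simp [List.range_eq_range']


-- ---- the DP loop ----
def stepA (cs : List Char) (a : Nat) (dp : List (List Int)) (e : Nat) : List (List Int) :=
  if cs.getD e ' ' = '|' then
    if prvF cs e ≠ -1 ∧ (a : Int) ≤ prvF cs e then
      dp.set a ((dp.getD a []).set e
        ((dp.getD a []).getD (prvF cs e).toNat 0 + (e : Int) - prvF cs e - 1))
    else dp
  else dp.set a ((dp.getD a []).set e ((dp.getD a []).getD (e - 1) 0))

theorem aInner_eq_stepA (cs : List Char) (a : Nat) (dp : List (List Int)) :
    aInner cs ((List.range cs.length).map (prvF cs)) a dp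
      = (List.range' (a + 1) (cs.length - (a + 1))).foldl (stepA cs a) dp := by
  unfold aInner
  apply PySem.List.foldl_congr_mem
  intro acc e he
  have he' : e < cs.length := by
    have := List.mem_range'_1.mp he
    omega
  simp only [stepA, pvGetD_map_range (prvF cs) cs.length e 0 he']

theorem aInner_aux (cs : List Char) (a : Nat) (ha : a < cs.length) :
    ∀ m, a + 1 + m ≤ cs.length → ∀ dp : List (List Int), a < dp.length →
    (dp.getD a []).length = cs.length →
    (dp.getD a []).getD a 0 = 0 →
    (∀ k, a < k → k < cs.length → cs.getD k ' ' = '|' → prvF cs k < (a : Int) →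
      (dp.getD a []).getD k 0 = 0) →
    ((List.range' (a + 1) m).foldl (stepA cs a) dp).length = dp.length ∧
    (∀ j, j ≠ a → ((List.range' (a + 1) m).foldl (stepA cs a) dp).getD j []
        = dp.getD j []) ∧
    (((List.range' (a + 1) m).foldl (stepA cs a) dp).getD a []).length = cs.length ∧
    (∀ k, (((List.range' (a + 1) m).foldl (stepA cs a) dp).getD a []).getD k 0 =
      if a + 1 ≤ k ∧ k < a + 1 + m then V cs a k else (dp.getD a []).getD k 0) := by
  intro m
  induction m with
  | zero =>
    intro hm dp h1 h2 h3 h4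
    exact ⟨rfl, fun j _ => rfl, h2, fun k => by rw [if_neg (by omega)]; rfl⟩
  | succ m ih =>
    intro hm dp h1 h2 h3 h4
    obtain ⟨hR1, hR2, hR3, hR4⟩ := ih (by omega) dp h1 h2 h3 h4
    rw [List.range'_concat, List.foldl_append, List.foldl_cons, List.foldl_nil]
    simp only [Nat.one_mul]
    set R := (List.range' (a + 1) m).foldl (stepA cs a) dp with hRdef
    set e := a + 1 + m with hedef
    have he : e < cs.length := by omega
    have haR : a < R.length := by omega
    have heR : e < (R.getD a []).length := by omega
    -- the value written at e (when a write happens) is V cs a e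
    unfold stepA
    by_cases hbar : cs.getD e ' ' = '|'
    · rw [if_pos hbar]
      by_cases hcond : prvF cs e ≠ -1 ∧ (a : Int) ≤ prvF cs e
      · rw [if_pos hcond]
        have hp0 : 0 ≤ prvF cs e := le_trans (Int.natCast_nonneg a) hcond.2
        have hplt := prvF_lt cs e
        have hpa : a ≤ (prvF cs e).toNat := by omega
        have hpe : (prvF cs e).toNat < e := by omega
        have hrowp : (R.getD a []).getD (prvF cs e).toNat 0 = V cs a (prvF cs e).toNat := by
          rw [hR4]
          rcases Nat.lt_or_ge a (prvF cs e).toNat with hgt | hle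
          · rw [if_pos (by omega)]
          · have hae : (prvF cs e).toNat = a := by omega
            rw [if_neg (by omega), hae, h3, V_zero_of_le cs a a (le_refl _) (by omega)]
        have hval : (R.getD a []).getD (prvF cs e).toNat 0 + (e : Int) - prvF cs e - 1
            = V cs a e := by
          rw [hrowp, ← V_step_bar cs a e hbar he hcond.2 (by omega)]
        refine ⟨by rw [List.length_set]; exact hR1, ?_, ?_, ?_⟩
        · intro j hj
          rw [pvGetD_set_ne R a j _ [] (fun h => hj h.symm)]
          exact hR2 j hj
        · rw [pvGetD_set_self R a _ [] haR, List.length_set]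
          exact hR3
        · intro k
          rw [pvGetD_set_self R a _ [] haR]
          by_cases hk : k = e
          · subst hk
            rw [pvGetD_set_self _ e _ 0 heR, hval, if_pos (by omega)]
          · rw [pvGetD_set_ne _ e k _ 0 (fun h => hk h.symm), hR4]
            by_cases hc1 : a + 1 ≤ k ∧ k < a + 1 + m
            · rw [if_pos hc1, if_pos (by omega)]
            · rw [if_neg hc1, if_neg (by omega)]
      · rw [if_neg hcond]
        have hplt : prvF cs e < (a : Int) := by
          have h0 : (0 : Int) ≤ (a : Int) := Int.natCast_nonneg a
          have hge := prvF_ge cs e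
          by_cases hpe : prvF cs e = -1
          · omega
          · have hnle : ¬ ((a : Int) ≤ prvF cs e) := fun hle => hcond ⟨hpe, hle⟩
            omega
        have horig : (dp.getD a []).getD e 0 = 0 := h4 e (by omega) he hbar hplt
        have hV : V cs a e = 0 := V_bar_out cs a e hbar he hplt (by omega)
        refine ⟨hR1, hR2, hR3, ?_⟩
        intro k
        rw [hR4]
        by_cases hk : k = e
        · subst hk
          rw [if_neg (by omega), if_pos (by omega), horig, hV]
        · by_cases hc1 : a + 1 ≤ k ∧ k < a + 1 + m
          · rw [if_pos hc1, if_pos (by omega)]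
          · rw [if_neg hc1, if_neg (by omega)]
    · rw [if_neg hbar]
      have he1 : e - 1 = a + m := by omega
      have hrowe : (R.getD a []).getD (e - 1) 0 = V cs a (e - 1) := by
        rw [hR4, he1]
        rcases Nat.eq_zero_or_pos m with hm0 | hmp
        · subst hm0
          rw [if_neg (by omega), Nat.add_zero, h3,
            V_zero_of_le cs a a (le_refl _) (by omega)]
        · rw [if_pos (by omega)]
      have hval : (R.getD a []).getD (e - 1) 0 = V cs a e := by
        rw [hrowe]
        have hb' : cs.getD ((e - 1) + 1) ' ' ≠ '|' := by
          have : (e - 1) + 1 = e := by omega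
          rw [this]; exact hbar
        have := V_step_nonbar cs a (e - 1) hb'
        have hee : (e - 1) + 1 = e := by omega
        rw [hee] at this
        rw [this]
      refine ⟨by rw [List.length_set]; exact hR1, ?_, ?_, ?_⟩
      · intro j hj
        rw [pvGetD_set_ne R a j _ [] (fun h => hj h.symm)]
        exact hR2 j hj
      · rw [pvGetD_set_self R a _ [] haR, List.length_set]
        exact hR3
      · intro k
        rw [pvGetD_set_self R a _ [] haR]
        by_cases hk : k = e
        · subst hk
          rw [pvGetD_set_self _ e _ 0 heR, hval, if_pos (by omega)]
        · rw [pvGetD_set_ne _ e k _ 0 (fun h => hk h.symm), hR4]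
          by_cases hc1 : a + 1 ≤ k ∧ k < a + 1 + m
          · rw [if_pos hc1, if_pos (by omega)]
          · rw [if_neg hc1, if_neg (by omega)]


theorem getD_replicate_zero (n b : Nat) : (List.replicate n (0 : Int)).getD b 0 = 0 := by
  simp [List.getD_eq_getElem?_getD, List.getElem?_replicate]
  split <;> rfl

theorem dp1_props (n f sec : Nat) (v : Int) (hf : f < n) (hsec : sec < n) :
    ((List.replicate n (List.replicate n (0 : Int))).set f
        (((List.replicate n (List.replicate n (0 : Int))).getD f []).set sec v)).length = n ∧
    (∀ a, a < n →
      (((List.replicate n (List.replicate n (0 : Int))).set f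
          (((List.replicate n (List.replicate n (0 : Int))).getD f []).set sec v)).getD a []).length = n) ∧
    (∀ a b,
      (((List.replicate n (List.replicate n (0 : Int))).set f
          (((List.replicate n (List.replicate n (0 : Int))).getD f []).set sec v)).getD a []).getD b 0
        = if a = f ∧ b = sec then v else 0) := by
  set dp0 : List (List Int) := List.replicate n (List.replicate n (0 : Int)) with hdp0
  have hlen0 : dp0.length = n := by simp [hdp0]
  have hrepa : ∀ a, a < n → dp0.getD a [] = List.replicate n (0 : Int) := by
    intro a haun
    simp [hdp0, List.getD_eq_getElem?_getD, haun]
  have hrepo : ∀ a, ¬ a < n → dp0.getD a [] = [] := by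
    intro a haun
    simp [hdp0, List.getD_eq_getElem?_getD, haun]
  refine ⟨by rw [List.length_set]; exact hlen0, ?_, ?_⟩
  · intro a haun
    by_cases haf : a = f
    · subst haf
      rw [pvGetD_set_self dp0 a _ [] (by omega), List.length_set]
      rw [hrepa a haun, List.length_replicate]
    · rw [pvGetD_set_ne dp0 f a _ [] (fun h => haf h.symm), hrepa a haun,
        List.length_replicate]
  · intro a b
    by_cases haf : a = f
    · subst haf
      rw [pvGetD_set_self dp0 a _ [] (by omega), hrepa a hf]
      by_cases hbs : b = sec
      · subst hbs
        rw [pvGetD_set_self _ b _ 0 (by rw [List.length_replicate]; exact hsec)]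
        rw [if_pos ⟨rfl, rfl⟩]
      · rw [pvGetD_set_ne _ sec b _ 0 (fun h => hbs h.symm), getD_replicate_zero,
          if_neg (by tauto)]
    · rw [pvGetD_set_ne dp0 f a _ [] (fun h => haf h.symm), if_neg (by tauto)]
      by_cases han : a < n
      · rw [hrepa a han, getD_replicate_zero]
      · rw [hrepo a han]
        rfl

theorem aFill_aux (cs : List Char) (dp1 : List (List Int))
    (hlen : dp1.length = cs.length)
    (hrows : ∀ a, a < cs.length → (dp1.getD a []).length = cs.length)
    (h0 : ∀ a, a < cs.length → (dp1.getD a []).getD a 0 = 0)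
    (hb0 : ∀ a, a < cs.length → ∀ k, a < k → k < cs.length → cs.getD k ' ' = '|' →
      prvF cs k < (a : Int) → (dp1.getD a []).getD k 0 = 0) :
    ∀ m, m ≤ cs.length - 2 →
    ((List.range m).foldl
        (fun dp start => aInner cs ((List.range cs.length).map (prvF cs)) start dp) dp1).length
      = cs.length ∧
    (∀ a, m ≤ a →
      ((List.range m).foldl
          (fun dp start => aInner cs ((List.range cs.length).map (prvF cs)) start dp) dp1).getD a []
        = dp1.getD a []) ∧
    (∀ a, a < m →
      (((List.range m).foldl
          (fun dp start => aInner cs ((List.range cs.length).map (prvF cs)) start dp) dp1).getD a []).length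
        = cs.length ∧
      ∀ k, (((List.range m).foldl
          (fun dp start => aInner cs ((List.range cs.length).map (prvF cs)) start dp) dp1).getD a []).getD k 0
        = if a + 1 ≤ k ∧ k < cs.length then V cs a k else (dp1.getD a []).getD k 0) := by
  intro m
  induction m with
  | zero =>
    intro hm
    exact ⟨hlen, fun a _ => rfl, fun a haun => absurd haun (by omega)⟩
  | succ m ih =>
    intro hm
    obtain ⟨hR1, hR2, hR3⟩ := ih (by omega)
    rw [List.range_succ, List.foldl_append, List.foldl_cons, List.foldl_nil]
    set R := (List.range m).foldl
      (fun dp start => aInner cs ((List.range cs.length).map (prvF cs)) start dp) dp1 with hRdef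
    have hmn : m + 2 < cs.length + 1 := by omega
    have hmlt : m < cs.length := by omega
    have hRm : R.getD m [] = dp1.getD m [] := hR2 m (le_refl _)
    rw [aInner_eq_stepA]
    obtain ⟨hI1, hI2, hI3, hI4⟩ := aInner_aux cs m hmlt (cs.length - (m + 1)) (by omega) R
      (by omega) (by rw [hRm]; exact hrows m hmlt) (by rw [hRm]; exact h0 m hmlt)
      (by rw [hRm]; exact hb0 m hmlt)
    refine ⟨by omega, ?_, ?_⟩
    · intro a hma
      rw [hI2 a (by omega)]
      exact hR2 a (by omega)
    · intro a ham
      by_cases haeq : a = m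
      · subst haeq
        refine ⟨hI3, ?_⟩
        intro k
        rw [hI4 k, hRm]
        by_cases hc1 : a + 1 ≤ k ∧ k < a + 1 + (cs.length - (a + 1))
        · rw [if_pos hc1, if_pos (by omega)]
        · rw [if_neg hc1, if_neg (by omega)]
      · rw [hI2 a haeq]
        exact hR3 a (by omega)


-- ---- full DP table characterization ----
theorem dp_value (cs : List Char) (f sec : Nat) (hfs : f < sec) (hsec : sec < cs.length)
    (hbarf : cs.getD f ' ' = '|') :
    (aFill cs ((List.range cs.length).map (prvF cs))
        ((List.replicate cs.length (List.replicate cs.length (0 : Int))).set f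
          (((List.replicate cs.length (List.replicate cs.length (0 : Int))).getD f []).set sec
            ((sec : Int) - (f : Int) - 1)))).length = cs.length ∧
    (∀ a, a < cs.length →
      ((aFill cs ((List.range cs.length).map (prvF cs))
        ((List.replicate cs.length (List.replicate cs.length (0 : Int))).set f
          (((List.replicate cs.length (List.replicate cs.length (0 : Int))).getD f []).set sec
            ((sec : Int) - (f : Int) - 1)))).getD a []).length = cs.length) ∧
    (∀ a b, a < cs.length → b < cs.length →
      ((aFill cs ((List.range cs.length).map (prvF cs))
        ((List.replicate cs.length (List.replicate cs.length (0 : Int))).set f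
          (((List.replicate cs.length (List.replicate cs.length (0 : Int))).getD f []).set sec
            ((sec : Int) - (f : Int) - 1)))).getD a []).getD b 0 = V cs a b) := by
  set n := cs.length with hn
  set v : Int := (sec : Int) - (f : Int) - 1 with hv
  obtain ⟨hl, hr, hval⟩ := dp1_props n f sec v (by omega) hsec
  set dp1 := (List.replicate n (List.replicate n (0 : Int))).set f
    (((List.replicate n (List.replicate n (0 : Int))).getD f []).set sec v) with hdp1
  have h0 : ∀ a, a < n → (dp1.getD a []).getD a 0 = 0 := by
    intro a _
    rw [hval a a, if_neg (by omega)]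
  have hb0 : ∀ a, a < n → ∀ k, a < k → k < n → cs.getD k ' ' = '|' →
      prvF cs k < (a : Int) → (dp1.getD a []).getD k 0 = 0 := by
    intro a _ k hak hkn hbark hplt
    rw [hval a k, if_neg ?_]
    rintro ⟨haf, hksec⟩
    rw [hksec] at hplt
    have hpm := prvF_max cs sec f hfs hbarf
    omega
  obtain ⟨hF1, hF2, hF3⟩ := aFill_aux cs dp1 hl hr h0 hb0 (n - 2) (le_refl _)
  have hAF : aFill cs ((List.range cs.length).map (prvF cs)) dp1
      = (List.range (n - 2)).foldl
          (fun dp start => aInner cs ((List.range cs.length).map (prvF cs)) start dp) dp1 := by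
    unfold aFill
    rfl
  rw [hAF]
  refine ⟨hF1, ?_, ?_⟩
  · intro a han
    by_cases ha2 : a < n - 2
    · exact (hF3 a ha2).1
    · rw [hF2 a (by omega)]
      exact hr a han
  · intro a b han hbn
    by_cases ha2 : a < n - 2
    · rw [(hF3 a ha2).2 b]
      by_cases hb2 : a + 1 ≤ b
      · rw [if_pos ⟨hb2, hbn⟩]
      · rw [if_neg (by omega), hval a b]
        rw [if_neg (by rintro ⟨h1, h2⟩; omega)]
        rw [V_zero_of_le cs a b (by omega) (by omega)]
    · rw [hF2 a (by omega), hval a b]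
      have hV := V_big cs a b (by omega) hbn (by omega)
      rw [hV]
      split
      · rename_i hcond
        obtain ⟨h1, h2⟩ := hcond
        rw [hv]
        omega
      · rfl

-- ---- bars, find and countP ----
theorem bar_prefix_iff (cs : List Char) (i : Nat) (hi : i < cs.length) :
    (['|'] <+: cs.drop i) ↔ cs.getD i ' ' = '|' := by
  rw [List.drop_eq_getElem_cons hi, List.cons_prefix_cons]
  rw [List.getD_eq_getElem _ _ hi]
  constructor
  · rintro ⟨h, -⟩; exact h.symm
  · intro h; exact ⟨h.symm, List.nil_prefix⟩

theorem bar_infix_iff (cs : List Char) : (['|'] <:+: cs) ↔ '|' ∈ cs := by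
  constructor
  · rintro ⟨st, tl, h⟩
    subst h
    simp
  · intro h
    obtain ⟨l1, l2, h⟩ := List.append_of_mem h
    subst h
    exact ⟨l1, l2, by simp⟩

theorem countP_bar_zero_iff (cs : List Char) :
    cs.countP (fun c => c = '|') = 0 ↔ '|' ∉ cs := by
  rw [List.countP_eq_zero]
  constructor
  · intro h hmem
    exact (by simpa using h '|' hmem)
  · intro h x hx
    simp only [decide_eq_true_eq]
    intro hc; subst hc; exact h hx

theorem findBar_neg_iff (cs : List Char) :
    PySem.Chars.find cs ['|'] = -1 ↔ cs.countP (fun c => c = '|') = 0 := by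
  rw [PySem.Chars.find_eq_neg_one_iff, bar_infix_iff, countP_bar_zero_iff]

theorem countP_take_zero (cs : List Char) (m : Nat) (hm : m ≤ cs.length)
    (h : ∀ i, i < m → cs.getD i ' ' ≠ '|') :
    (cs.take m).countP (fun c => c = '|') = 0 := by
  induction m with
  | zero => simp
  | succ m ih =>
    rw [List.take_add_one, List.getElem?_eq_getElem (by omega)]
    simp only [Option.toList_some, List.countP_append, List.countP_cons, List.countP_nil]
    rw [ih (by omega) (fun i hi => h i (by omega))]
    have hb := h m (by omega)
    rw [List.getD_eq_getElem _ _ (by omega)] at hb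
    simp [hb]


theorem countP_split (cs : List Char) (hf : 0 ≤ PySem.Chars.find cs ['|']) :
    (PySem.Chars.find cs ['|']).toNat < cs.length ∧
    cs.getD (PySem.Chars.find cs ['|']).toNat ' ' = '|' ∧
    cs.countP (fun c => c = '|')
      = 1 + (cs.drop ((PySem.Chars.find cs ['|']).toNat + 1)).countP (fun c => c = '|') := by
  obtain ⟨hpre, hmin⟩ := PySem.Chars.find_spec hf
  set fN := (PySem.Chars.find cs ['|']).toNat with hfN
  have hfn : fN < cs.length := by
    have hlen := hpre.length_le
    simp only [List.length_drop, List.length_cons, List.length_nil] at hlen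
    omega
  have hbarf : cs.getD fN ' ' = '|' := (bar_prefix_iff cs fN hfn).mp hpre
  refine ⟨hfn, hbarf, ?_⟩
  have hminb : ∀ i, i < fN → cs.getD i ' ' ≠ '|' := by
    intro i hi hbar
    exact hmin i hi ((bar_prefix_iff cs i (by omega)).mpr hbar)
  have hsplit : cs = cs.take (fN + 1) ++ cs.drop (fN + 1) := (List.take_append_drop _ _).symm
  conv_lhs => rw [hsplit]
  rw [List.countP_append]
  have htake : (cs.take (fN + 1)).countP (fun c => c = '|') = 1 := by
    rw [List.take_add_one, List.getElem?_eq_getElem hfn]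
    simp only [Option.toList_some, List.countP_append, List.countP_cons, List.countP_nil]
    rw [countP_take_zero cs fN (by omega) hminb]
    rw [List.getD_eq_getElem _ _ hfn] at hbarf
    simp [hbarf]
  rw [htake]

theorem second_eq (cs : List Char) (hf : 0 ≤ PySem.Chars.find cs ['|']) :
    PySem.Chars.findFrom cs ['|'] (PySem.Chars.find cs ['|'] + 1) none
      = if PySem.Chars.find (cs.drop ((PySem.Chars.find cs ['|']).toNat + 1)) ['|'] = -1 then -1
        else (((PySem.Chars.find cs ['|']).toNat + 1 : Nat) : Int)
          + PySem.Chars.find (cs.drop ((PySem.Chars.find cs ['|']).toNat + 1)) ['|'] := by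
  have hfn : (PySem.Chars.find cs ['|']).toNat < cs.length := (countP_split cs hf).1
  have hcast : PySem.Chars.find cs ['|'] + 1
      = (((PySem.Chars.find cs ['|']).toNat + 1 : Nat) : Int) := by omega
  rw [hcast, PySem.Chars.findFrom_natCast cs ['|'] ((PySem.Chars.find cs ['|']).toNat + 1) (by omega)]

theorem bars_pack (cs : List Char) (hc : ¬ cs.countP (fun c => c = '|') < 2) :
    ∃ fN secN : Nat,
      PySem.Chars.find cs ['|'] = (fN : Int) ∧
      PySem.Chars.findFrom cs ['|'] (PySem.Chars.find cs ['|'] + 1) none = (secN : Int) ∧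
      fN < secN ∧ secN < cs.length ∧ cs.getD fN ' ' = '|' := by
  have hne : PySem.Chars.find cs ['|'] ≠ -1 := by
    intro h
    rw [findBar_neg_iff] at h
    omega
  have hge := PySem.Chars.neg_one_le_find (s := cs) (sub := ['|'])
  have hf : 0 ≤ PySem.Chars.find cs ['|'] := by omega
  obtain ⟨hfn, hbarf, hcnt⟩ := countP_split cs hf
  set fN := (PySem.Chars.find cs ['|']).toNat with hfN
  have hrest : (cs.drop (fN + 1)).countP (fun c => c = '|') ≠ 0 := by omega
  have hfd : PySem.Chars.find (cs.drop (fN + 1)) ['|'] ≠ -1 := by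
    intro h
    exact hrest ((findBar_neg_iff _).mp h)
  have hfdge := PySem.Chars.neg_one_le_find (s := cs.drop (fN + 1)) (sub := ['|'])
  have hfd0 : 0 ≤ PySem.Chars.find (cs.drop (fN + 1)) ['|'] := by omega
  obtain ⟨hpre2, -⟩ := PySem.Chars.find_spec hfd0
  set fd := (PySem.Chars.find (cs.drop (fN + 1)) ['|']).toNat with hfddef
  rw [List.drop_drop] at hpre2
  have hsecn : fd + (fN + 1) < cs.length := by
    have hlen := hpre2.length_le
    simp only [List.length_drop, List.length_cons, List.length_nil] at hlen
    omega
  refine ⟨fN, fN + 1 + fd, by omega, ?_, by omega, by omega, hbarf⟩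
  rw [second_eq cs hf, ← hfN, if_neg hfd]
  push_cast
  omega

-- ---- glue: branch equations for the two ports ----
theorem noItems_zeros1 (s : String) (si ei : List Int) (h : PySem.Str.find s "|" = -1) :
    noItems s si ei = aZeros si.length := by
  simp only [noItems]
  rw [if_pos h]

theorem noItems_zeros2 (s : String) (si ei : List Int) (h1 : ¬ PySem.Str.find s "|" = -1)
    (h2 : PySem.Str.findFrom s "|" (PySem.Str.find s "|" + 1) = -1) :
    noItems s si ei = aZeros si.length := by
  simp only [noItems]
  rw [if_neg h1, if_pos h2]

theorem noItems_main (s : String) (si ei : List Int) (h1 : ¬ PySem.Str.find s "|" = -1)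
    (h2 : ¬ PySem.Str.findFrom s "|" (PySem.Str.find s "|" + 1) = -1) :
    noItems s si ei = aRes
      (aFill s.toList (aLeftBar s.toList)
        ((List.replicate s.toList.length (List.replicate s.toList.length (0 : Int))).set
          (PySem.Str.find s "|").toNat
          (((List.replicate s.toList.length (List.replicate s.toList.length (0 : Int))).getD
              (PySem.Str.find s "|").toNat []).set
            (PySem.Str.findFrom s "|" (PySem.Str.find s "|" + 1)).toNat
            (PySem.Str.findFrom s "|" (PySem.Str.find s "|" + 1) - PySem.Str.find s "|" - 1))))
      si ei := by
  simp only [noItems]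
  rw [if_neg h1, if_neg h2]

theorem alt_zeros (s : String) (si ei : List Int)
    (h : (s.toList.map (fun c => if c = '|' then (1 : Int) else 0)).sum < 2) :
    noItems_alt s si ei = List.replicate si.length 0 := by
  simp only [noItems_alt]
  rw [if_pos h]

theorem alt_main (s : String) (si ei : List Int)
    (h : ¬ (s.toList.map (fun c => if c = '|' then (1 : Int) else 0)).sum < 2) :
    noItems_alt s si ei
      = bRes (bScan s.toList).1 (bScan s.toList).2.1 (bNxt s.toList) si ei := by
  simp only [noItems_alt]
  rw [if_neg h]

theorem aZeros_eq (L : Nat) : aZeros L = List.replicate L (0 : Int) := by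
  unfold aZeros
  refine List.eq_replicate_iff.mpr ⟨by simp, ?_⟩
  intro b hb
  simp only [List.mem_map] at hb
  obtain ⟨i, -, hbi⟩ := hb
  omega

theorem sum_bars (cs : List Char) :
    (cs.map (fun c => if c = '|' then (1 : Int) else 0)).sum
      = (cs.countP (fun c => c = '|') : Int) := by
  induction cs with
  | nil => simp
  | cons c t ih =>
    simp only [List.map_cons, List.sum_cons, List.countP_cons, ih]
    by_cases hb : c = '|'
    · simp [hb]
      ring
    · simp [hb]

theorem aRes_eq_map (dp : List (List Int)) (si ei : List Int) :
    aRes dp si ei = (List.range si.length).map (fun (i : Nat) =>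
      PySem.List.pyGetD (PySem.List.pyGetD dp (PySem.List.pyGetD si (i : Int) 0 - 1) [])
        (PySem.List.pyGetD ei (i : Int) 0 - 1) 0) := by
  unfold aRes
  rw [PySem.List.foldl_append_singleton_eq_map, List.nil_append]

theorem bRes_eq_map (pref prv nxt : List Int) (si ei : List Int) :
    bRes pref prv nxt si ei = (List.range si.length).map (fun (i : Nat) =>
      if PySem.List.pyGetD nxt (PySem.List.pyGetD si (i : Int) 0 - 1) 0
          < PySem.List.pyGetD prv (PySem.List.pyGetD ei (i : Int) 0) 0 then
        PySem.List.pyGetD pref (PySem.List.pyGetD prv (PySem.List.pyGetD ei (i : Int) 0) 0) 0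
          - PySem.List.pyGetD pref
              (PySem.List.pyGetD nxt (PySem.List.pyGetD si (i : Int) 0 - 1) 0 + 1) 0
      else 0) := by
  unfold bRes
  rw [PySem.List.foldl_append_singleton_eq_map, List.nil_append]

theorem entryA (cs : List Char) (dpf : List (List Int)) (hdl : dpf.length = cs.length)
    (hrl : ∀ a, a < cs.length → (dpf.getD a []).length = cs.length)
    (hv : ∀ a b, a < cs.length → b < cs.length → (dpf.getD a []).getD b 0 = V cs a b)
    (siv eiv : Int) (h1 : 1 ≤ siv) (h2 : siv ≤ (cs.length : Int))
    (h3 : 1 ≤ eiv) (h4 : eiv ≤ (cs.length : Int)) :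
    PySem.List.pyGetD (PySem.List.pyGetD dpf (siv - 1) []) (eiv - 1) 0
      = V cs (siv - 1).toNat (eiv - 1).toNat := by
  have ha : (siv - 1).toNat < cs.length := by omega
  have hb : (eiv - 1).toNat < cs.length := by omega
  rw [PySem.List.pyGetD_eq_getElem _ _ (by omega) (by omega : siv - 1 < (dpf.length : Int))]
  rw [← List.getD_eq_getElem dpf [] (by omega)]
  have hrow : (dpf.getD (siv - 1).toNat []).length = cs.length := hrl _ ha
  rw [PySem.List.pyGetD_eq_getElem _ _ (by omega)
    (by omega : eiv - 1 < ((dpf.getD (siv - 1).toNat []).length : Int))]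
  rw [← List.getD_eq_getElem _ 0 (by omega)]
  exact hv _ _ ha hb

theorem entryB (cs : List Char) (siv eiv : Int) (h1 : 1 ≤ siv)
    (h2 : siv ≤ (cs.length : Int)) (h3 : 1 ≤ eiv) (h4 : eiv ≤ (cs.length : Int)) :
    (if PySem.List.pyGetD ((List.range (cs.length + 1)).map (fun i => (nxtF cs i : Int))) (siv - 1) 0
        < PySem.List.pyGetD ((List.range (cs.length + 1)).map (prvF cs)) eiv 0 then
      PySem.List.pyGetD ((List.range (cs.length + 1)).map (cntF cs))
          (PySem.List.pyGetD ((List.range (cs.length + 1)).map (prvF cs)) eiv 0) 0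
        - PySem.List.pyGetD ((List.range (cs.length + 1)).map (cntF cs))
            (PySem.List.pyGetD ((List.range (cs.length + 1)).map (fun i => (nxtF cs i : Int))) (siv - 1) 0 + 1) 0
      else 0) = V cs (siv - 1).toNat (eiv - 1).toNat := by
  set n := cs.length with hn
  set a := (siv - 1).toNat with hadef
  set b := (eiv - 1).toNat with hbdef
  have hlenn : ((List.range (n + 1)).map (fun i => (nxtF cs i : Int))).length = n + 1 := by simp
  have hlenp : ((List.range (n + 1)).map (prvF cs)).length = n + 1 := by simp
  have hlenc : ((List.range (n + 1)).map (cntF cs)).length = n + 1 := by simp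
  have hl : PySem.List.pyGetD ((List.range (n + 1)).map (fun i => (nxtF cs i : Int))) (siv - 1) 0
      = (nxtF cs a : Int) := by
    rw [PySem.List.pyGetD_eq_getElem _ _ (by omega) (by rw [hlenn]; omega)]
    rw [List.getElem_map, List.getElem_range]
  have hr : PySem.List.pyGetD ((List.range (n + 1)).map (prvF cs)) eiv 0 = prvF cs (b + 1) := by
    rw [PySem.List.pyGetD_eq_getElem _ _ (by omega) (by rw [hlenp]; omega)]
    rw [List.getElem_map, List.getElem_range]
    have : eiv.toNat = b + 1 := by omega
    rw [this]
  rw [hl, hr]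
  unfold V
  by_cases hcond : (nxtF cs a : Int) < prvF cs (b + 1)
  · rw [if_pos hcond, if_pos hcond]
    have hrb0 : 0 ≤ prvF cs (b + 1) := le_trans (Int.natCast_nonneg (nxtF cs a)) (le_of_lt hcond)
    have hrblt : prvF cs (b + 1) < ((b + 1 : Nat) : Int) := prvF_lt cs (b + 1)
    have hbn : b < n := by omega
    rw [PySem.List.pyGetD_eq_getElem _ _ hrb0 (by rw [hlenc]; push_cast; omega)]
    rw [List.getElem_map, List.getElem_range]
    have hcast : (nxtF cs a : Int) + 1 = ((nxtF cs a + 1 : Nat) : Int) := by push_cast; ring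
    rw [hcast, PySem.List.pyGetD_natCast]
    rw [pvGetD_map_range (cntF cs) (n + 1) (nxtF cs a + 1) 0 (by push_cast at hrblt; omega)]
  · rw [if_neg hcond, if_neg hcond]

theorem noItems_spec : Claim_equal_noItems := by
  intro s si ei hdom hpre
  unfold Spec_noItems
  have hfindeq : PySem.Str.find s "|" = PySem.Chars.find s.toList ['|'] := by
    rw [PySem.Str.find_eq]
    rfl
  have hfromeq : ∀ st : Int, PySem.Str.findFrom s "|" st
      = PySem.Chars.findFrom s.toList ['|'] st := by
    intro st
    rw [PySem.Str.findFrom_eq]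
    rfl
  unfold Pre_noItems at hpre
  by_cases hc : s.toList.countP (fun c => c = '|') < 2
  · have hsum : (s.toList.map (fun c => if c = '|' then (1 : Int) else 0)).sum < 2 := by
      rw [sum_bars]
      exact_mod_cast hc
    rw [alt_zeros s si ei hsum]
    by_cases hf : PySem.Str.find s "|" = -1
    · rw [noItems_zeros1 s si ei hf, aZeros_eq]
    · have hge := PySem.Chars.neg_one_le_find s.toList ['|']
      rw [hfindeq] at hf
      have hf0 : 0 ≤ PySem.Chars.find s.toList ['|'] := by omega
      obtain ⟨hfn, hbarf, hcnt⟩ := countP_split s.toList hf0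
      have hrest : (s.toList.drop ((PySem.Chars.find s.toList ['|']).toNat + 1)).countP
          (fun c => c = '|') = 0 := by omega
      have hfd : PySem.Chars.find
          (s.toList.drop ((PySem.Chars.find s.toList ['|']).toNat + 1)) ['|'] = -1 :=
        (findBar_neg_iff _).mpr hrest
      have hsecond : PySem.Str.findFrom s "|" (PySem.Str.find s "|" + 1) = -1 := by
        rw [hfromeq, hfindeq, second_eq s.toList hf0, if_pos hfd]
      rw [noItems_zeros2 s si ei (by rw [hfindeq]; exact hf) hsecond, aZeros_eq]
  · obtain ⟨fN, secN, hfe, hse, hfs, hsecn, hbarf⟩ := bars_pack s.toList hc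
    have hsum : ¬ (s.toList.map (fun c => if c = '|' then (1 : Int) else 0)).sum < 2 := by
      rw [sum_bars]
      exact_mod_cast hc
    have hf1 : ¬ PySem.Str.find s "|" = -1 := by
      rw [hfindeq, hfe]
      omega
    have hsecondeq : PySem.Str.findFrom s "|" (PySem.Str.find s "|" + 1) = (secN : Int) := by
      rw [hfromeq, hfindeq]
      exact hse
    have hf2 : ¬ PySem.Str.findFrom s "|" (PySem.Str.find s "|" + 1) = -1 := by
      rw [hsecondeq]
      omega
    rw [noItems_main s si ei hf1 hf2, alt_main s si ei hsum]
    rw [hsecondeq, hfindeq, hfe]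
    simp only [Int.toNat_natCast]
    rw [aLeftBar_eq]
    obtain ⟨hdl, hrl, hv⟩ := dp_value s.toList fN secN hfs hsecn hbarf
    rw [aRes_eq_map, bRes_eq_map]
    simp only [bScan_eq, bNxt_eq]
    apply List.map_congr_left
    intro i him
    have hiL : i < si.length := List.mem_range.mp him
    obtain ⟨hLe, hq⟩ := hpre.resolve_left hc
    have hsiv := hq (si.getD i 0)
      (List.mem_append_left _ (by rw [List.getD_eq_getElem si 0 hiL]; exact List.getElem_mem _))
    have hiE : i < ei.length := by omega
    have heivmem : ei.getD i 0 ∈ ei.take si.length := by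
      rw [List.getD_eq_getElem ei 0 hiE]
      have htk : (ei.take si.length)[i]'(by simp; omega) = ei[i] := List.getElem_take
      exact htk ▸ List.getElem_mem _
    have heiv := hq (ei.getD i 0) (List.mem_append_right _ heivmem)
    simp only [PySem.List.pyGetD_natCast]
    rw [entryA s.toList _ hdl hrl hv (si.getD i 0) (ei.getD i 0) hsiv.1 hsiv.2 heiv.1 heiv.2]
    exact (entryB s.toList (si.getD i 0) (ei.getD i 0) hsiv.1 hsiv.2 heiv.1 heiv.2).symm
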